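/- GENERATED by mk_final_copies.py from the proof of the farm's unit `start_decoder.C5a` (farm:start_decoder.C5a.1: Proof.lean) as the
   re-elaboration sweep compiled it — do not edit. -/
import Asan.CheckWalk
import Vorbis.Spec.Reader
import Vorbis.Spec.StartDecoderC4
import Vorbis.Spec.StartDecoderC7
import Vorbis.Spec.Units.start_decoder_C5a
import Vorbis.Spec.Worked.start_decoder_C5a_Lemmas

/-!
  The unit `start_decoder.C5a` (0x114594 … 0x1145e4, the join tail 0x114651 … 0x114662, 0x11483c … 0x114844): the three walks.
      c5a_dense_walk    arm (1): `sparse = 0` → the tail → the head of loop 3818 with `j = 0` (`At5L e 0`)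
      c5a_call_walk     0x1145db … `call setup_malloc` … 0x1145e9 (`At5M`), both outcomes of the allocator
      c5a_sparse_walk   `sparse = 1`: arm (2) `E >> 2 > total` → the tail → `AtC6`; arm (3) the statistic
                        `setup_temp_memory_required` (stored or not) → 0x1145db, then `c5a_call_walk`
  The pure lemmas (carry of `Frame` / `Cur`, the exit assertions) are in Lemmas.lean.
-/

open X86 X86.User Asan Vorbis Vorbis.Spec Vorbis.Spec.StartDecoder

set_option maxRecDepth 100000
set_option maxHeartbeats 4000000

namespace Vorbis.Spec.start_decoder_C5a

/-- **Arm (1) of C5a, the dense book** (`sparse = 0`): 0x114594 `c->sparse` (check 0x114598) is 0, `je 0x114651`; the tail reads it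
again (check 0x114655) as 0, `je 0x11483c`; `r12d = d[R+24H]` = 0 (Z24), `ebp = 0`, `jmp 0x11484a`: the head of loop 3818 with
`j = 0`, `sorted_count = 0`. Only return addresses are stored (below `R`): `c5a_carry`, `c5a_to5L`. -/
theorem c5a_dense_walk {Lay : Layout} (hLay : Lay.hi = 0x1000000) {μ : Microarch} (hμ : UserX.MicroOK μ) {u₀ : State}
    (hcode : HasCodeNat Lay u₀ Vorbis.L.start_decoder.entry Vorbis.Code.code_start_decoder.nat Vorbis.L.start_decoder.size)
    (hld1 : Asan.SmallCheck Lay μ Vorbis.WayInv (Vorbis.CodeOK u₀) [.rax, .rdx] 1 Vorbis.L.__asan_load1_noabort.entry)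
    {g : Ghost} {i : Nat} {A2 A3 Ai : Arena} {A : Arena × List Obj} {lengths total : Nat} {v : State}
    (hat : InC5 u₀ g i A2 A3 Ai A lengths total v) (hsp0 : Codebook.sparse v.mem (g.cb v.mem i) = 0) :
    ReachVia Lay μ WayInv v (fun w => AtC6 u₀ g i w ∨ (∃ e, At5L u₀ g i e 0 w) ∨ At5M u₀ g i w) := by
  have hfr := hat.frame
  have he := hfr.entry
  v_entry he
  simp only [depth] at he_room he_stack
  have w_rip := hfr.rip
  obtain ⟨hr1, hr2⟩ := hfr.r_eq
  simp only [steady] at hr1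
  have hRA : g.RA = (g.e.reg .rsp).toNat := rfl
  have c_rsp : v.reg .rsp = g.e.reg .rsp - 1480 := by
    rw [hfr.rsp]
    refine (eq_addr _ _ ?_).symm
    unfold Ghost.R Ghost.RA steady
    u_omega
  have ha := hat.cur.sd.arena
  have hcb := hat.cur.ages.cbOK
  have hBA : A.1.Blk (codebooksBlock v.mem g.f) := hcb.F2.mono hat.cur.ages.exti
  have hcin := hcb.cb_in i hat.cur.lt
  have hboff := ha.block_off hBA
  have hbin := arena_inside ha hBA
  have hbnd := ha.bounds
  simp only [vblock, Off.sizeof.Codebook] at hcin hboff hbin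
  have hcdef : stb_vorbis.codebooks_at v.mem g.f i = g.cb v.mem i := rfl
  rw [hcdef] at hcin
  have c_r14n : (v.reg .r14).toNat = g.cb v.mem i := by
    rw [hat.cur.r14]
    exact toNat_addr _ (by omega)
  have hBA' : A.1.Block (stb_vorbis.codebooks v.mem g.f) (2120 * (stb_vorbis.codebook_count v.mem g.f).toNat) := hBA
  have e27 : v.reg .r14 + 27 = addr (g.cb v.mem i + 27) := by
    rw [hat.cur.r14]
    exact Vorbis.addr_add_lit _ 27
  have t27 : (v.reg .r14 + 27).toNat = g.cb v.mem i + 27 := by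
    rw [e27]
    exact toNat_addr _ (by omega)
  have hsparse : v.mem.readLE (v.reg .r14 + 27) 1 = 0 := by
    rw [e27]
    exact hsp0
  have t1 : (g.e.reg .rsp - 1488).toNat = (g.e.reg .rsp).toNat - 1488 := by u_omega
  have c_rbx := hat.rbx
  have hz24 : v.mem.readLE (g.e.reg .rsp - 1444) 4 = 0 := by
    have e : g.e.reg .rsp - 1444 = addr (g.R + 0x24) := by
      have e1 : g.R + 0x24 = (g.e.reg .rsp).toNat - 1444 := by
        show (g.e.reg .rsp).toNat - 1480 + 0x24 = _
        omega
      rw [e1, ← Vorbis.addr_sub_lit _ 1444 (by show (1444 : Nat) ≤ _; omega), Vorbis.addr_toNat]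
    rw [e]
    exact hat.cur.sd.frame.z24 (by omega) (by omega)
  have w_eq : Mem.EqOn Vorbis.L.textLo Vorbis.L.textHi u₀.mem v.mem := hfr.code
  have hdf : v.flags .df = false := (show abiInv _ from hfr.inv).1
  have hmx : v.mxcsr &&& 0x1F80 = 0x1F80 := (show abiInv _ from hfr.inv).2
  have hsse := Vorbis.sseOK_of_abiInv hfr.inv
  u_walk hcode [hμ.vendor]
    until [Vorbis.L.start_decoder.cut113, Vorbis.L.start_decoder.loop10, Vorbis.L.start_decoder.cut110] span [Vorbis.L.textLo, Vorbis.L.textHi] side (v_side)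
  case check_114598 =>
    have hun : ShadowUntouched v.mem s_114598.mem := by v_untouched
    apply Vorbis.Spec.check_site hfr.shadow hun (C7.cb_site hat.cur 27 1 (by omega) (by omega))
    exact t27
  case check_114655 =>
    have hun : ShadowUntouched v.mem s_114655.mem := by v_untouched
    apply Vorbis.Spec.check_site hfr.shadow hun (C7.cb_site hat.cur 27 1 (by omega) (by omega))
    exact t27
  -- 0x11484a: the head of loop 3818, `j = 0`, `sorted_count = 0`
  have hsame : Mem.SameExcept [⟨g.R - 408, g.R⟩] v.mem s_114844.mem := by
    rw [w_mem]
    refine Mem.SameExcept.writeLE _ v.mem _ 8 _ ?_ ⟨⟨g.R - 408, g.R⟩, List.mem_cons_self, ?_, ?_⟩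
    · rw [t1]
      omega
    · rw [t1]
      show g.R - 408 ≤ _
      omega
    · rw [t1]
      show _ ≤ g.R
      omega
  have hq : ∀ x, x ∈ [(⟨g.R - 408, g.R⟩ : Span)] → C5aWin g x := by
    intro x hx
    rw [List.mem_singleton.mp hx]
    exact Or.inl ⟨Nat.le_refl _, Nat.le_refl _⟩
  have hun : ShadowUntouched v.mem s_114844.mem := by v_untouched
  have habi : abiInv s_114844 := by
    refine Vorbis.abiInv_of ?_ ?_
    · rw [w_flags]
      simp only [X86.User.df_setStatus]
      exact w_df_114655
    · rw [w_mxcsr]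
      exact hmx
  have hrsp : s_114844.reg .rsp = v.reg .rsp := by
    rw [w_rsp, c_rsp]
  obtain ⟨hF, hC, hcb', hsf, heq, hin⟩ := c5a_carry hat hsame hun hq w_rip hrsp w_eq habi (w_kept .r14 rfl)
  have hL := c5a_to5L hat hsp0 hF hC hcb' hsf heq hin w_r13 (w_kept .rbx rfl) w_r12 w_rbp
  exact ReachVia.done (Or.inr (Or.inl ⟨_, A, lengths, A2, A3, Ai, hL⟩))

/-- **0x1145db … 0x1145e9: `c->codeword_lengths = setup_malloc(f, c->entries)`** (line 3804), from the join `Mid5a` to the return of the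
allocator: `esi = E` (`[r14+4]`, checked at 0x1145ac), `rdi = q[R+18H]` = f, the call. Both outcomes (`Cur.alloc_call`: the ghost arena
grows by the block of `E` bytes; `Cur.alloc_fail_any`: rax = 0, the same ghost) give `In5M` by `c5a_to5M`; the bytes of the temp block
P1 over the call: `c5a_call_eqOn`. -/
theorem c5a_call_walk {Lay : Layout} (hLay : Lay.hi = 0x1000000) {μ : Microarch} (hμ : UserX.MicroOK μ) {u₀ : State}
    (hcode : HasCodeNat Lay u₀ Vorbis.L.start_decoder.entry Vorbis.Code.code_start_decoder.nat Vorbis.L.start_decoder.size)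
    (hmalloc : ∀ (others : List Obj) (frames : List (Nat × FrameLayout)) (A : Arena), Calls Lay μ Vorbis.WayInv (Vorbis.conv u₀) Vorbis.L.setup_malloc.entry (Vorbis.Spec.setup_malloc.spec others frames A))
    {g : Ghost} {i : Nat} {A2 A3 Ai : Arena} {A : Arena × List Obj} {lengths : Nat} {v : State}
    (h : Mid5a u₀ g i A2 A3 Ai A lengths v) :
    ReachVia Lay μ WayInv v (fun w => AtC6 u₀ g i w ∨ (∃ e, At5L u₀ g i e 0 w) ∨ At5M u₀ g i w) := by
  have hfr0 := h.frame
  have hcur := h.cur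
  have he := hfr0.entry
  v_entry he
  simp only [depth] at he_room he_stack
  have w_rip := hfr0.rip
  have hshad := hfr0.shadow
  have hpos : Pos g A := Pos.of hfr0 hcur
  have hm0 : MInv g i A2 A3 Ai A v.mem := MInv.of hfr0 hcur
  have hcw := hm0.c_where
  have p1 := hpos.r_eq
  have p2 := hpos.ra_lo
  have p3 := hpos.ra_hi
  have hRA : g.RA = (g.e.reg .rsp).toNat := rfl
  have hsp : (v.reg .rsp).toNat = g.R := by
    rw [hfr0.rsp]
    exact toNat_addr _ (by omega)
  have c_rsp : v.reg .rsp = g.e.reg .rsp - 1480 := by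
    rw [hfr0.rsp]
    refine (eq_addr _ _ ?_).symm
    unfold Ghost.R Ghost.RA steady
    u_omega
  have c_rbx := h.rbx
  have e4 : v.reg .r14 + 4 = addr (g.cb v.mem i + 4) := by
    rw [h.cur.r14]
    exact Vorbis.addr_add_lit _ 4
  have hk1 := h.k1
  have r4 : v.mem.readLE (v.reg .r14 + 4) 4 = (Codebook.entries v.mem (g.cb v.mem i)).toNat := by
    have h0 := hk1.ent_nonneg
    simp only [vacc, voff] at h0 ⊢
    rw [e4]
    exact v.mem.u32_of_i32_nonneg (g.cb v.mem i + 4) h0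
  have r_f : v.mem.readLE (g.e.reg .rsp - 1456) 8 = g.f := by
    have e : g.e.reg .rsp - 1456 = addr (g.R + 0x18) := by
      have e1 : g.R + 0x18 = (g.e.reg .rsp).toNat - 1456 := by
        show (g.e.reg .rsp).toNat - 1480 + 0x18 = _
        omega
      rw [e1, ← Vorbis.addr_sub_lit _ 1456 (by show (1456 : Nat) ≤ _; omega), Vorbis.addr_toNat]
    rw [e]
    exact h.cur.slot_f
  have w_eq : Mem.EqOn Vorbis.L.textLo Vorbis.L.textHi u₀.mem v.mem := hfr0.code
  have hdf : v.flags .df = false := (show abiInv _ from hfr0.inv).1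
  have hmx : v.mxcsr &&& 0x1F80 = 0x1F80 := (show abiInv _ from hfr0.inv).2
  have hsse := Vorbis.sseOK_of_abiInv hfr0.inv
  obtain ⟨hf1, hf2, hf3⟩ := c5a_obj_where hcur hshad hfr0.offText
  have hm := hmalloc A.2 g.frames' A.1
  u_walk hcode [hμ.vendor] until [Vorbis.L.start_decoder.cut110] span [Vorbis.L.textLo, Vorbis.L.textHi] side (v_side)
  case side_has =>
    have p9 := hpos.ar_lo
    have t4 : (v.reg .r14 + 4).toNat = g.cb v.mem i + 4 := by
      rw [e4]
      exact toNat_addr _ (by omega)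
    unfold Layout.Has Layout.lo
    rw [hLay, t4]
    omega
  case call_inv => v_inv
  case pre_1145e4 =>
    have hun : ShadowUntouched v.mem s_1145e4.mem := by v_untouched
    apply c5a_malloc_pre hfr0 hcur hun
    · rw [w_mem]
      apply Mem.EqOn.writeLE
      · u_omega
      · u_omega
    · rw [w_rsp]
      u_omega
    · rw [w_rdi]
      exact toNat_addr _ (by omega)
  -- 0x1145e9: setup_malloc(f, E) returned
  have hE0 := hk1.ent_nonneg
  have hE1 := hk1.ent_lt
  have ersi : (s_1145e4.reg .rsi).toNat % 2 ^ 32 = (Codebook.entries v.mem (g.cb v.mem i)).toNat := by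
    rw [w_rsi_1145e4, Vorbis.toNat_ofBV32, BitVec.toNat_ofNat]
    omega
  simp only [X86.User.Spec.footprint, vspec] at w_same
  have e_sp : (s_1145e4.reg .rsp).toNat + 8 = g.R := by
    rw [w_rsp_1145e4]
    u_omega
  have e_a : (g.e.reg .rsp - 1488).toNat + 8 = g.R := by u_omega
  have e_rdi : (s_1145e4.reg .rdi).toNat = g.f := by
    rw [w_rdi_1145e4]
    exact toNat_addr _ (by omega)
  have hrspR : s_1145e4r.reg .rsp = v.reg .rsp := by
    rw [w_rsp, c_rsp]
  -- the bytes of the temp block P1 over the call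
  have hT : A.1.TBlock lengths (Codebook.entries v.mem (g.cb v.mem i)).toNat := h.temps.tblock (List.mem_singleton.mpr rfl)
  have hoffT := hcur.sd.arena.tblock_off hT
  have hrT := hcur.sd.arena.tblock_range hT
  have hr8 := le_r8 (Codebook.entries v.mem (g.cb v.mem i)).toNat
  have hbnd := hcur.sd.arena.bounds
  have hlenE : Mem.EqOn lengths (lengths + (Codebook.entries v.mem (g.cb v.mem i)).toNat) v.mem s_1145e4r.mem := by
    have hs' := w_same
    rw [e_rdi] at hs'
    exact c5a_call_eqOn hpos w_mem_1145e4 e_a e_sp hs' (by omega) (by omega)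
  have hlenI : lengths + (Codebook.entries v.mem (g.cb v.mem i)).toNat ≤ 2 ^ 64 := by omega
  by_cases hfit : A.1.Fits ((s_1145e4.reg .rsi).toNat % 2 ^ 32)
  · -- the request fits: the ghost arena grows by the final block of `lengths`
    obtain ⟨r1, r2, r3, r4', r5⟩ := Cur.alloc_call hfr0 hcur w_mem_1145e4 e_a e_sp e_rdi w_same w_post hfit w_rip hrspR
      (Vorbis.conv_code_eqOn w_code) w_inv (w_kept.get .r14 rfl)
    apply ReachVia.done
    refine Or.inr (Or.inr ⟨_, lengths, A2, A3, Ai,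
      c5a_to5M h r1 r2 r3 r4' rfl rfl hlenE hlenI (w_kept.get .rbx rfl) (Or.inr ?_)⟩)
    have hsince := hcur.sd.arena.since_pushSetup ((s_1145e4.reg .rsi).toNat % 2 ^ 32)
    rw [r5, ← ersi, Nat.add_assoc]
    exact hsince.older hcur.ages.exti
  · -- the request does not fit: rax = 0, the same ghost
    obtain ⟨r1, r2, r3, r4', r5⟩ := Cur.alloc_fail_any hfr0 hcur w_mem_1145e4 e_a e_sp e_rdi w_same w_post hfit
      w_rip hrspR (Vorbis.conv_code_eqOn w_code) w_inv (w_kept.get .r14 rfl)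
    apply ReachVia.done
    exact Or.inr (Or.inr ⟨A, lengths, A2, A3, Ai,
      c5a_to5M h r1 r2 r3 r4' rfl rfl hlenE hlenI (w_kept.get .rbx rfl) (Or.inl r5)⟩)


/-- **The sparse book** (`sparse = 1`): 0x114594 `c->sparse` (check 0x114598) is 1; `r12d = E` (check 0x1145ac), `sar eax,2 ; cmp eax,ebp ;
jg`. Arm (2), `E >> 2 > total`: the tail reads `sparse` = 1 (check 0x114655), falls through to 0x114668: `AtC6` with `4·total < E`
(`c5a_toC6`). Arm (3), the conversion: `r15 = q[R+18H]` = f, the check of `f + 16` (0x1145cc: a field of `*f`), `cmp r12d,[r15+10H] ;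
jle`; taken or not (then the unchecked store 0x1145d7 into `[f+16, f+20)`, a `C5aWin` window), the join 0x1145db holds `Mid5a`
(`c5a_carry`, `c5a_toMid`), and `c5a_call_walk` does the call. -/
theorem c5a_sparse_walk {Lay : Layout} (hLay : Lay.hi = 0x1000000) {μ : Microarch} (hμ : UserX.MicroOK μ) {u₀ : State}
    (hcode : HasCodeNat Lay u₀ Vorbis.L.start_decoder.entry Vorbis.Code.code_start_decoder.nat Vorbis.L.start_decoder.size)
    (hld1 : Asan.SmallCheck Lay μ Vorbis.WayInv (Vorbis.CodeOK u₀) [.rax, .rdx] 1 Vorbis.L.__asan_load1_noabort.entry)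
    (hld4 : Asan.SmallCheck Lay μ Vorbis.WayInv (Vorbis.CodeOK u₀) [.rax, .rcx, .rdx] 4 Vorbis.L.__asan_load4_noabort.entry)
    (hmalloc : ∀ (others : List Obj) (frames : List (Nat × FrameLayout)) (A : Arena), Calls Lay μ Vorbis.WayInv (Vorbis.conv u₀) Vorbis.L.setup_malloc.entry (Vorbis.Spec.setup_malloc.spec others frames A))
    {g : Ghost} {i : Nat} {A2 A3 Ai : Arena} {A : Arena × List Obj} {lengths total : Nat} {v : State}
    (hat : InC5 u₀ g i A2 A3 Ai A lengths total v) (hsp1 : Codebook.sparse v.mem (g.cb v.mem i) = 1) :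
    ReachVia Lay μ WayInv v (fun w => AtC6 u₀ g i w ∨ (∃ e, At5L u₀ g i e 0 w) ∨ At5M u₀ g i w) := by
  have hfr := hat.frame
  have he := hfr.entry
  v_entry he
  simp only [depth] at he_room he_stack
  have w_rip := hfr.rip
  obtain ⟨hr1, hr2⟩ := hfr.r_eq
  simp only [steady] at hr1
  have hRA : g.RA = (g.e.reg .rsp).toNat := rfl
  have c_rsp : v.reg .rsp = g.e.reg .rsp - 1480 := by
    rw [hfr.rsp]
    refine (eq_addr _ _ ?_).symm
    unfold Ghost.R Ghost.RA steady
    u_omega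
  have hpos : Pos g A := Pos.of hfr hat.cur
  have hm0 : MInv g i A2 A3 Ai A v.mem := MInv.of hfr hat.cur
  have hcw := hm0.c_where
  have c_r14n : (v.reg .r14).toNat = g.cb v.mem i := by
    rw [hat.cur.r14]
    exact toNat_addr _ (by omega)
  have e27 : v.reg .r14 + 27 = addr (g.cb v.mem i + 27) := by
    rw [hat.cur.r14]
    exact Vorbis.addr_add_lit _ 27
  have t27 : (v.reg .r14 + 27).toNat = g.cb v.mem i + 27 := by
    rw [e27]
    exact toNat_addr _ (by omega)
  have e4 : v.reg .r14 + 4 = addr (g.cb v.mem i + 4) := by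
    rw [hat.cur.r14]
    exact Vorbis.addr_add_lit _ 4
  have t4 : (v.reg .r14 + 4).toNat = g.cb v.mem i + 4 := by
    rw [e4]
    exact toNat_addr _ (by omega)
  have hsparse : v.mem.readLE (v.reg .r14 + 27) 1 = 1 := by
    rw [e27]
    exact hsp1
  have hk1 := hat.k1
  have r4 : v.mem.readLE (v.reg .r14 + 4) 4 = (Codebook.entries v.mem (g.cb v.mem i)).toNat := by
    have h0 := hk1.ent_nonneg
    simp only [vacc, voff] at h0 ⊢
    rw [e4]
    exact v.mem.u32_of_i32_nonneg (g.cb v.mem i + 4) h0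
  have t1 : (g.e.reg .rsp - 1488).toNat = (g.e.reg .rsp).toNat - 1488 := by u_omega
  have c_rbx := hat.rbx
  have c_rbp : v.reg .rbp = UInt64.ofNat total := hat.rbp
  have r_f : v.mem.readLE (g.e.reg .rsp - 1456) 8 = g.f := by
    have e : g.e.reg .rsp - 1456 = addr (g.R + 0x18) := by
      have e1 : g.R + 0x18 = (g.e.reg .rsp).toNat - 1456 := by
        show (g.e.reg .rsp).toNat - 1480 + 0x18 = _
        omega
      rw [e1, ← Vorbis.addr_sub_lit _ 1456 (by show (1456 : Nat) ≤ _; omega), Vorbis.addr_toNat]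
    rw [e]
    exact hat.cur.slot_f
  have w_eq : Mem.EqOn Vorbis.L.textLo Vorbis.L.textHi u₀.mem v.mem := hfr.code
  have hdf : v.flags .df = false := (show abiInv _ from hfr.inv).1
  have hmx : v.mxcsr &&& 0x1F80 = 0x1F80 := (show abiInv _ from hfr.inv).2
  have hsse := Vorbis.sseOK_of_abiInv hfr.inv
  obtain ⟨hf1, hf2, hf3⟩ := c5a_obj_where hat.cur hfr.shadow hfr.offText
  have tf16 : (UInt64.ofNat g.f + 16).toNat = g.f + 16 := by
    have e : UInt64.ofNat g.f + 16 = addr (g.f + 16) := Vorbis.addr_add_lit _ 16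
    rw [e]
    exact toNat_addr _ (by omega)
  have p1 := hpos.r_eq
  have p2 := hpos.ra_lo
  have p3 := hpos.ra_hi
  have hE0 := hk1.ent_nonneg
  have hE1 := hk1.ent_lt
  have htot := hat.total_le
  u_walk hcode [hμ.vendor]
    until [Vorbis.L.start_decoder.cut113, Vorbis.L.start_decoder.loop10, 0x1145db] span [Vorbis.L.textLo, Vorbis.L.textHi] side (v_side)
  case check_114598 =>
    have hun : ShadowUntouched v.mem s_114598.mem := by v_untouched
    apply Vorbis.Spec.check_site hfr.shadow hun (C7.cb_site hat.cur 27 1 (by omega) (by omega))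
    exact t27
  case check_1145ac =>
    have hun : ShadowUntouched v.mem s_1145ac.mem := by v_untouched
    apply Vorbis.Spec.check_site hfr.shadow hun (C7.cb_site hat.cur 4 4 (by omega) (by omega))
    exact t4
  case check_114655 =>
    have hun : ShadowUntouched v.mem s_114655.mem := by v_untouched
    apply Vorbis.Spec.check_site hfr.shadow hun (C7.cb_site hat.cur 27 1 (by omega) (by omega))
    exact t27
  case check_1145cc =>
    -- `f->setup_temp_memory_required`: a field of the object `*f` (OB1)
    have hun : ShadowUntouched v.mem s_1145cc.mem := by v_untouched
    have hsite : Site (Live (stackObjs g.frames' ++ A.2)) (g.f + 16) 4 :=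
      hat.cur.sd.bits.site_field hat.cur.sd.env.live 16 4 (by omega) (by omega) rfl
    apply Vorbis.Spec.check_site hfr.shadow hun hsite
    exact tf16
  · -- 0x114668: the book stays sparse (`E >> 2 > total`): `AtC6`
    rw [Vorbis.Spec.cnt32_part_toInt total (by omega), c5a_sar2 _ (by omega)] at hbr_1145bd
    have hlt : 4 * (total : Int) < Codebook.entries v.mem (g.cb v.mem i) := by omega
    have hsame : Mem.SameExcept [⟨g.R - 408, g.R⟩] v.mem s_114662.mem := by
      rw [w_mem]
      refine Mem.SameExcept.writeLE _ v.mem _ 8 _ ?_ ⟨⟨g.R - 408, g.R⟩, List.mem_cons_self, ?_, ?_⟩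
      · rw [t1]
        omega
      · rw [t1]
        show g.R - 408 ≤ _
        omega
      · rw [t1]
        show _ ≤ g.R
        omega
    have hq : ∀ x, x ∈ [(⟨g.R - 408, g.R⟩ : Span)] → C5aWin g x := by
      intro x hx
      rw [List.mem_singleton.mp hx]
      exact Or.inl ⟨Nat.le_refl _, Nat.le_refl _⟩
    have hun : ShadowUntouched v.mem s_114662.mem := by v_untouched
    have habi : abiInv s_114662 := by
      refine Vorbis.abiInv_of ?_ ?_
      · rw [w_flags]
        simp only [X86.User.df_setStatus]
        exact w_df_114655
      · rw [w_mxcsr]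
        exact hmx
    have hrsp : s_114662.reg .rsp = v.reg .rsp := by
      rw [w_rsp, c_rsp]
    obtain ⟨hF, hC, hcb', hsf, heq, hin⟩ := c5a_carry hat hsame hun hq w_rip hrsp w_eq habi (w_kept .r14 rfl)
    have h6 := c5a_toC6 hat hsp1 hlt hF hC hcb' hsf heq hin w_r13 (w_kept .rbx rfl) (w_kept .rbp rfl)
    exact ReachVia.done (Or.inl ⟨A, lengths, total, A2, A3, Ai, h6⟩)
  · -- 0x1145db, the statistic is not updated (`jle` taken): only return addresses were pushed
    have hsame : Mem.SameExcept [⟨g.R - 408, g.R⟩] v.mem s_1145d5.mem := by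
      rw [w_mem]
      refine Mem.SameExcept.writeLE _ v.mem _ 8 _ ?_ ⟨⟨g.R - 408, g.R⟩, List.mem_cons_self, ?_, ?_⟩
      · rw [t1]
        omega
      · rw [t1]
        show g.R - 408 ≤ _
        omega
      · rw [t1]
        show _ ≤ g.R
        omega
    have hq : ∀ x, x ∈ [(⟨g.R - 408, g.R⟩ : Span)] → C5aWin g x := by
      intro x hx
      rw [List.mem_singleton.mp hx]
      exact Or.inl ⟨Nat.le_refl _, Nat.le_refl _⟩
    have hun : ShadowUntouched v.mem s_1145d5.mem := by v_untouched
    have habi : abiInv s_1145d5 := by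
      refine Vorbis.abiInv_of ?_ ?_
      · rw [w_flags]
        simp only [X86.User.df_setStatus]
        exact w_df_1145cc
      · rw [w_mxcsr]
        exact hmx
    have hrsp : s_1145d5.reg .rsp = v.reg .rsp := by
      rw [w_rsp, c_rsp]
    obtain ⟨hF, hC, hcb', hsf, heq, hin⟩ := c5a_carry hat hsame hun hq w_rip hrsp w_eq habi (w_kept .r14 rfl)
    have hmid := c5a_toMid hat hsp1 hF hC hcb' hsf heq hin (w_kept .rbx rfl)
    exact c5a_call_walk hLay hμ hcode hmalloc hmid
  · -- 0x1145db after the store `f->setup_temp_memory_required = E` (0x1145d7, unchecked: the address was checked at 0x1145cc)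
    have hsame : Mem.SameExcept [⟨g.R - 408, g.R⟩, ⟨g.f + 16, g.f + 20⟩] v.mem s_1145d7.mem := by
      rw [w_mem]
      refine Mem.SameExcept.trans (ν := v.mem.writeLE (g.e.reg .rsp - 1488) 8 1131985) ?_ ?_
      · refine Mem.SameExcept.writeLE _ v.mem _ 8 _ ?_ ⟨⟨g.R - 408, g.R⟩, List.mem_cons_self, ?_, ?_⟩
        · rw [t1]
          omega
        · rw [t1]
          show g.R - 408 ≤ _
          omega
        · rw [t1]
          show _ ≤ g.R
          omega
      · refine Mem.SameExcept.writeLE _ _ _ 4 _ ?_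
          ⟨⟨g.f + 16, g.f + 20⟩, List.mem_cons_of_mem _ List.mem_cons_self, ?_, ?_⟩
        · rw [tf16]
          omega
        · rw [tf16]
          exact Nat.le_refl _
        · rw [tf16]
          exact Nat.le_refl _
    have hq : ∀ x, x ∈ [(⟨g.R - 408, g.R⟩ : Span), ⟨g.f + 16, g.f + 20⟩] → C5aWin g x := by
      intro x hx
      simp only [List.mem_cons, List.mem_nil_iff, or_false] at hx
      rcases hx with rfl | rfl
      · exact Or.inl ⟨Nat.le_refl _, Nat.le_refl _⟩
      · exact Or.inr ⟨Nat.le_refl _, Nat.le_refl _⟩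
    have hun : ShadowUntouched v.mem s_1145d7.mem := by
      rw [w_mem]
      refine Mem.EqOn.trans (ν := v.mem.writeLE (g.e.reg .rsp - 1488) 8 1131985) ?_ ?_
      · exact Mem.eqOn_writeLE _ _ 8 _ 0xC00000 0x200000 (by omega) (by omega)
      · exact Mem.eqOn_writeLE _ _ 4 _ 0xC00000 0x200000 (by omega) (by omega)
    have habi : abiInv s_1145d7 := by
      refine Vorbis.abiInv_of ?_ ?_
      · rw [w_flags]
        simp only [X86.User.df_setStatus]
        exact w_df_1145cc
      · rw [w_mxcsr]
        exact hmx
    have hrsp : s_1145d7.reg .rsp = v.reg .rsp := by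
      rw [w_rsp, c_rsp]
    obtain ⟨hF, hC, hcb', hsf, heq, hin⟩ := c5a_carry hat hsame hun hq w_rip hrsp w_eq habi (w_kept .r14 rfl)
    have hmid := c5a_toMid hat hsp1 hF hC hcb' hsf heq hin (w_kept .rbx rfl)
    exact c5a_call_walk hLay hμ hcode hmalloc hmid

end Vorbis.Spec.start_decoder_C5a

/-- The unit `start_decoder.C5a`: the dense book by `c5a_dense_walk`, the sparse one by `c5a_sparse_walk` (`LengthsAt.sparse_01`). -/
theorem Vorbis.Spec.Worked.start_decoder_C5a_ok : Vorbis.Spec.start_decoder_C5a.Statement := by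
  intro Lay hLay μ hμ u₀ hcode hld1 hld4 hmalloc g i v hat
  obtain ⟨A, lengths, total, A2, A3, Ai, h⟩ := hat
  rcases h.place.sparse_01 with h0 | h1
  · exact Vorbis.Spec.start_decoder_C5a.c5a_dense_walk hLay hμ hcode hld1 h h0
  · exact Vorbis.Spec.start_decoder_C5a.c5a_sparse_walk hLay hμ hcode hld1 hld4 hmalloc h h1
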